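-- pv_equiv track=rewrite | github.com/paiml/depyler | examples/hard_decorators_protocols.py | count_operations_quadratic
-- ===== SOURCE A (Python) =====
-- def count_operations_quadratic(n: int) -> int:
--     """Count the number of operations in a quadratic nested loop."""
--     ops: int = 0
--     i: int = 0
--     while i < n:
--         j: int = 0
--         while j < n:
--             ops = ops + 1
--             j = j + 1
--         i = i + 1
--     return ops
-- ===== SOURCE B (Python) =====
-- def count_operations_quadratic(n: int) -> int:
--     """Closed form: the nested loop runs max(0, n)**2 times."""
--     return max(0, n) ** 2
-- ===== Notes on version B (the rewrite author's own statement) =====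
-- stated objective: faster
-- what changed: Replaced the O(n^2) nested counting loops with the closed form max(0, n)**2.
import Mathlib
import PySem

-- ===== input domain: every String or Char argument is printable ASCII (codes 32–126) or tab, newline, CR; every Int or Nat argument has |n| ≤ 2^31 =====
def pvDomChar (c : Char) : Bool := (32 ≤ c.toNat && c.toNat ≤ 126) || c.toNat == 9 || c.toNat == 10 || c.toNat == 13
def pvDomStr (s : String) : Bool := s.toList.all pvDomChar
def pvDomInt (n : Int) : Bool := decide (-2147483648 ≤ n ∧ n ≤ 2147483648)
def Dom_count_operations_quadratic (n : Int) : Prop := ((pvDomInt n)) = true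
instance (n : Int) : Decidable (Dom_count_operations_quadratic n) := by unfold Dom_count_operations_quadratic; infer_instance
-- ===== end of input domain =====

-- B replaces A's quadratic nested counting loops with the closed form max(0, n)^2.

-- ===== PORT A =====
-- inner while loop 'while j < n: ops += 1; j += 1'; fuel = (n - j).toNat is exactly
-- the number of remaining iterations, so the fuel guard never fires early
def pvInnerLoop (n : Int) : Nat → Int → Int → Int
  | 0, _, ops => ops
  | fuel + 1, j, ops => if j < n then pvInnerLoop n fuel (j + 1) (ops + 1) else ops

-- outer while loop 'while i < n: <inner loop from j = 0>; i += 1'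
def pvOuterLoop (n : Int) : Nat → Int → Int → Int
  | 0, _, ops => ops
  | fuel + 1, i, ops =>
      if i < n then pvOuterLoop n fuel (i + 1) (pvInnerLoop n (n - 0).toNat 0 ops) else ops

def count_operations_quadratic (n : Int) : Int :=
  pvOuterLoop n n.toNat 0 0

-- ===== PORT B =====
def count_operations_quadratic_alt (n : Int) : Int :=
  (max 0 n) ^ 2

-- ===== PRECONDITION & SPEC =====
def Spec_count_operations_quadratic (n : Int) (out : Int) : Prop := out = count_operations_quadratic_alt n
instance (n : Int) (out : Int) : Decidable (Spec_count_operations_quadratic n out) := by unfold Spec_count_operations_quadratic; infer_instance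

-- ===== CLAIM (what is proved, stated in full; the proofs are below) =====
def Claim_equal_count_operations_quadratic : Prop := ∀ (n : Int), Dom_count_operations_quadratic n → Spec_count_operations_quadratic n (count_operations_quadratic n)

-- ===== LEMMAS AND PROOFS =====
theorem pvInnerLoop_eq (n : Int) (fuel : Nat) : ∀ (j ops : Int), (n - j).toNat ≤ fuel →
    pvInnerLoop n fuel j ops = ops + max 0 (n - j) := by
  induction fuel with
  | zero => intro j ops h; simp only [pvInnerLoop]; omega
  | succ f ih =>
      intro j ops h
      simp only [pvInnerLoop]
      split
      · rw [ih (j + 1) (ops + 1) (by omega)]; omega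
      · omega

theorem pvOuterLoop_eq (n : Int) (fuel : Nat) : ∀ (i ops : Int), (n - i).toNat ≤ fuel →
    pvOuterLoop n fuel i ops = ops + max 0 (n - i) * max 0 n := by
  induction fuel with
  | zero =>
      intro i ops h
      simp only [pvOuterLoop]
      have hm : max 0 (n - i) = 0 := by omega
      rw [hm]; ring
  | succ f ih =>
      intro i ops h
      simp only [pvOuterLoop]
      split
      · rw [ih (i + 1) _ (by omega), pvInnerLoop_eq n _ 0 ops (by omega)]
        have h1 : max 0 (n - 0) = max 0 n := by omega
        have h2 : max 0 (n - i) = max 0 (n - (i + 1)) + 1 := by omega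
        rw [h1, h2]; ring
      · have hm : max 0 (n - i) = 0 := by omega
        rw [hm]; ring

-- ===== VERDICT (by name: the statement is the Claim_ definition above) =====
theorem count_operations_quadratic_spec : Claim_equal_count_operations_quadratic := by
  intro n _
  unfold Spec_count_operations_quadratic count_operations_quadratic count_operations_quadratic_alt
  rw [pvOuterLoop_eq n n.toNat 0 0 (by omega)]
  have h : max 0 (n - 0) = max 0 n := by omega
  rw [h, sq]
  ring
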